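-- pv_equiv track=rewrite | github.com/Hassan-Raza-Shaikh/Python | Random checks/rafay_code3.py | cool_down_ok
-- ===== SOURCE A (Python) =====
-- def cool_down_ok(timeline, blocks, n):
--     """Check underscore requirement between consecutive hashtag blocks."""
--     for i in range(len(blocks) - 1):
--         end_prev = blocks[i][1]
--         start_next = blocks[i + 1][0]
--         segment = timeline[end_prev + 1:start_next]
--         underscore_run = 0
--         satisfied = False
--         for ch in segment:
--             if ch == '_':
--                 underscore_run += 1
--                 if underscore_run >= n:
--                     satisfied = True
--             elif ch == '!':
--                 underscore_run = 0  # reset on !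
--         if not satisfied:
--             return False
--     return True
-- ===== SOURCE B (Python) =====
-- def cool_down_ok(timeline, blocks, n):
--     """Check underscore requirement between consecutive hashtag blocks."""
--     need = max(n, 1)
--     for (_, end_prev), (start_next, _) in zip(blocks, blocks[1:]):
--         gap = timeline[end_prev + 1:start_next]
--         if all(piece.count('_') < need for piece in gap.split('!')):
--             return False
--     return True
-- ===== Notes on version B (the rewrite author's own statement) =====
-- stated objective: simpler
-- what changed: B replaces A's index loop with reset-on-'!' running counter by a zip over consecutive block pairs and a split-on-'!' / per-piece underscore-count check (a gap passes iff some piece has count >= max(n,1)).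
import Mathlib
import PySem

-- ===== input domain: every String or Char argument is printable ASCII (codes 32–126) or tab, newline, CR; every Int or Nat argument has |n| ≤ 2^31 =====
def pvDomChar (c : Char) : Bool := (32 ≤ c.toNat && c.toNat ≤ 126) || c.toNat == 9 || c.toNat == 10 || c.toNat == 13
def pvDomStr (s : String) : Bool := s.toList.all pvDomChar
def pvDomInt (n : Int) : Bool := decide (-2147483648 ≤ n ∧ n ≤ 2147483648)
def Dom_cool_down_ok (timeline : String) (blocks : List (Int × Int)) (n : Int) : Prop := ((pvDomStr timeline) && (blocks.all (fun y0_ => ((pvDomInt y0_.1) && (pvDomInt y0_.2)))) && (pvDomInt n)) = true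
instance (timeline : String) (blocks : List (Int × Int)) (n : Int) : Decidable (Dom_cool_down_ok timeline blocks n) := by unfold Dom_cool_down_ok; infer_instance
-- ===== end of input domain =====

-- B replaces A's index loop with reset-on-'!' running counter by a zip over consecutive
-- block pairs and a split-on-'!' / per-piece underscore-count check.

-- ===== PORT A =====
-- inner 'for ch in segment' loop, state (underscore_run, satisfied)
def pvA_inner (n : Int) : List Char → Int → Bool → Bool
  | [], _, sat => sat
  | c :: rest, run, sat =>
    if c = '_' then
      pvA_inner n rest (run + 1) (if n ≤ run + 1 then true else sat)
    else if c = '!' then pvA_inner n rest 0 sat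
    else pvA_inner n rest run sat

-- outer 'for i in range(len(blocks) - 1)' loop with early 'return False'.
-- i and i+1 are always in range (i < len(blocks) - 1), so the getD default is never used.
def pvA_outer (timeline : List Char) (blocks : List (Int × Int)) (n : Int) : List Int → Bool
  | [] => true
  | i :: is =>
    let end_prev := (PySem.List.pyGetD blocks i (0, 0)).2
    let start_next := (PySem.List.pyGetD blocks (i + 1) (0, 0)).1
    let segment := PySem.List.slice timeline (some (end_prev + 1)) (some start_next)
    if pvA_inner n segment 0 false then pvA_outer timeline blocks n is else false

def cool_down_ok (timeline : String) (blocks : List (Int × Int)) (n : Int) : Bool :=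
  pvA_outer timeline.toList blocks n (PySem.List.pyRange 0 ((blocks.length : Int) - 1) 1)

-- ===== PORT B =====
-- all(piece.count('_') < need for piece in gap.split('!'))
def pvB_gap (need : Int) (gap : List Char) : Bool :=
  (gap.splitOn '!').all (fun piece => decide ((piece.count '_' : Int) < need))

-- 'for (_, end_prev), (start_next, _) in zip(blocks, blocks[1:])' with early 'return False'
def pvB_go (timeline : List Char) (need : Int) : List ((Int × Int) × (Int × Int)) → Bool
  | [] => true
  | (p, q) :: rest =>
    if pvB_gap need (PySem.List.slice timeline (some (p.2 + 1)) (some q.1)) then false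
    else pvB_go timeline need rest

def cool_down_ok_alt (timeline : String) (blocks : List (Int × Int)) (n : Int) : Bool :=
  pvB_go timeline.toList (max n 1) (blocks.zip blocks.tail)

-- ===== PRECONDITION & SPEC =====
def Spec_cool_down_ok (timeline : String) (blocks : List (Int × Int)) (n : Int) (out : Bool) : Prop := out = cool_down_ok_alt timeline blocks n
instance (timeline : String) (blocks : List (Int × Int)) (n : Int) (out : Bool) : Decidable (Spec_cool_down_ok timeline blocks n out) := by unfold Spec_cool_down_ok; infer_instance

-- ===== CLAIM (what is proved, stated in full; the proofs are below) =====
def Claim_equal_cool_down_ok : Prop := ∀ (timeline : String) (blocks : List (Int × Int)) (n : Int), Dom_cool_down_ok timeline blocks n → Spec_cool_down_ok timeline blocks n (cool_down_ok timeline blocks n)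

-- ===== LEMMAS AND PROOFS =====

-- 'some piece of the chunk list qualifies', first chunk credited with the incoming run r
def pvChunkOK (n r : Int) (p : List Char) : Bool :=
  decide (1 ≤ p.count '_') && decide (n ≤ r + (p.count '_' : Int))

def pvSpecChunks (n r : Int) : List (List Char) → Bool
  | [] => false
  | p :: ps => pvChunkOK n r p || ps.any (pvChunkOK n 0)

lemma pvSpecChunks_zero (n : Int) (chs : List (List Char)) :
    pvSpecChunks n 0 chs = chs.any (pvChunkOK n 0) := by
  cases chs <;> simp [pvSpecChunks]

lemma pvA_inner_eq (n : Int) (cs : List Char) : ∀ (r : Int) (sat : Bool),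
    pvA_inner n cs r sat = (sat || pvSpecChunks n r (cs.splitOn '!')) := by
  induction cs with
  | nil => intro r sat; simp [pvA_inner, List.splitOn, List.splitOnP_nil, pvSpecChunks, pvChunkOK]
  | cons c rest ih =>
    intro r sat
    obtain ⟨p, ps, hps⟩ := List.exists_cons_of_ne_nil (List.splitOnP_ne_nil (· == '!') rest)
    by_cases h_ : c = '_'
    · subst h_
      simp only [pvA_inner, ih]
      simp only [List.splitOn, List.splitOnP_cons, hps] at *
      simp only [show (('_' : Char) == '!') = false from rfl, Bool.false_eq_true, if_false,
        List.modifyHead, pvSpecChunks, pvChunkOK, List.count_cons_self]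
      by_cases hn : n ≤ r + 1 <;> by_cases hc : 1 ≤ p.count '_' <;>
        cases sat <;> cases hany : ps.any (pvChunkOK n 0) <;>
        simp [hn, hc, hany] <;> omega
    · by_cases hb : c = '!'
      · subst hb
        rw [show pvA_inner n ('!' :: rest) r sat = pvA_inner n rest 0 sat from by
          simp [pvA_inner]]
        rw [ih]
        simp [List.splitOn, List.splitOnP_cons, pvSpecChunks, pvChunkOK, hps, List.any_cons]
      · simp only [pvA_inner, if_neg h_, if_neg hb, ih]
        simp only [List.splitOn, List.splitOnP_cons, hps] at *
        have hc : (c == '!') = false := by simp [hb]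
        simp only [hc, Bool.false_eq_true, if_false, List.modifyHead, pvSpecChunks, pvChunkOK,
          List.count_cons_of_ne (by simpa using h_)]

-- the per-gap checks of A and B are complementary
lemma pvGap_eq (n : Int) (seg : List Char) :
    pvA_inner n seg 0 false = !(pvB_gap (max n 1) seg) := by
  rw [pvA_inner_eq, pvSpecChunks_zero]
  simp only [Bool.false_or, pvB_gap, List.any_eq_not_all_not, pvChunkOK]
  refine congrArg (fun f => !(List.all (List.splitOn '!' seg) f)) (funext fun p => ?_)
  by_cases h1 : 1 ≤ p.count '_' <;> by_cases h2 : n ≤ (p.count '_' : Int) <;>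
    simp [h1, h2] <;> omega

-- both loops are an 'all' with the same body
lemma pvA_outer_all (tl : List Char) (blocks : List (Int × Int)) (n : Int) (is : List Int) :
    pvA_outer tl blocks n is = is.all (fun i =>
      pvA_inner n (PySem.List.slice tl (some ((PySem.List.pyGetD blocks i (0, 0)).2 + 1))
        (some (PySem.List.pyGetD blocks (i + 1) (0, 0)).1)) 0 false) := by
  induction is with
  | nil => rfl
  | cons i is ih =>
    simp only [pvA_outer, ih, List.all_cons]
    split <;> simp_all

lemma pvB_go_all (tl : List Char) (need : Int) (ps : List ((Int × Int) × (Int × Int))) :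
    pvB_go tl need ps = ps.all (fun pq =>
      !(pvB_gap need (PySem.List.slice tl (some (pq.1.2 + 1)) (some pq.2.1)))) := by
  induction ps with
  | nil => rfl
  | cons pq ps ih =>
    obtain ⟨p, q⟩ := pq
    simp only [pvB_go, ih, List.all_cons]
    split <;> simp_all

-- range-indexed 'all' over consecutive pairs = 'all' over zip with tail
lemma pvZipIndex {α : Type} (g : α × α → Bool) (d : α) : ∀ (xs : List α),
    (List.range (xs.length - 1)).all (fun k => g (xs.getD k d, xs.getD (k + 1) d)) =
      (xs.zip xs.tail).all g := by
  intro xs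
  induction xs with
  | nil => rfl
  | cons x ys ih =>
    cases ys with
    | nil => rfl
    | cons y zs =>
      simp only [List.length_cons, Nat.add_sub_cancel, List.range_succ_eq_map, List.all_cons,
        List.all_map, List.zip_cons_cons, List.tail_cons] at *
      simp only [List.getD_cons_zero, List.getD_cons_succ]
      rw [← ih]
      rfl

lemma pvRange_eq (L : Nat) :
    PySem.List.pyRange 0 ((L : Int) - 1) 1 = (List.range (L - 1)).map (Nat.cast : Nat → Int) := by
  rw [PySem.List.pyRange_of_pos 0 ((L : Int) - 1) Int.one_pos]
  have : (if (0 : Int) < (L : Int) - 1 then (((L : Int) - 1 - 0 + 1 - 1) / 1).toNat else 0) = L - 1 := by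
    split <;> omega
  rw [this]
  exact List.map_congr_left (fun k _ => by ring)

-- ===== VERDICT (by name: the statement is the Claim_ definition above) =====
theorem cool_down_ok_spec : Claim_equal_cool_down_ok := by
  intro timeline blocks n _
  unfold Spec_cool_down_ok cool_down_ok cool_down_ok_alt
  rw [pvA_outer_all, pvB_go_all, pvRange_eq,
    ← pvZipIndex (fun pq => !(pvB_gap (max n 1)
        (PySem.List.slice timeline.toList (some (pq.1.2 + 1)) (some pq.2.1)))) ((0 : Int), (0 : Int)) blocks]
  have hmap : ∀ (f : Int → Bool), ((List.range (blocks.length - 1)).map (Nat.cast : Nat → Int)).all f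
      = (List.range (blocks.length - 1)).all (fun k => f (k : Int)) := fun f => by rw [List.all_map]; rfl
  rw [hmap]
  refine congrArg _ (funext fun k => ?_)
  simp only [PySem.List.pyGetD_natCast]
  rw [show ((k : Int) + 1) = ((k + 1 : Nat) : Int) by push_cast; ring, PySem.List.pyGetD_natCast]
  exact pvGap_eq n _
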